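-- pv_equiv track=rewrite | github.com/piif/AdventOfCode2023 | 2023/12_patterns/day12a.py | recordMatch
-- ===== SOURCE A (Python) =====
-- def recordMatch(records, ranges):
--     prev = None
--     i = 0
--     count = 0
--     for r in records+'.':
--         if r == '#':
--             count += 1
--         elif count > 0:
--             if ranges[i] != count:
--                 return False
--             i += 1
--             count = 0
--     # if i != len(records):
--     #     return False
--     return True
-- ===== SOURCE B (Python) =====
-- def _runs(s):
--     # lengths of maximal consecutive '#' runs, left to right
--     runs = []
--     pos = 0
--     n = len(s)
--     while pos < n:
--         if s[pos] == '#':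
--             end = pos
--             while end < n and s[end] == '#':
--                 end += 1
--             runs.append(end - pos)
--             pos = end
--         else:
--             pos += 1
--     return runs
--
-- def recordMatch(records, ranges):
--     for j, L in enumerate(_runs(records)):
--         if ranges[j] != L:
--             return False
--     return True
-- ===== Notes on version B (the rewrite author's own statement) =====
-- stated objective: alternative
-- what changed: B first extracts the list of maximal '#'-run lengths in a separate scanning pass and then compares that list positionally against ranges, instead of A's single character loop over records+'.' that interleaves run counting, a sentinel flush, and range checking in one stateful pass; same cost, two-phase decomposition.
import Mathlib
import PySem

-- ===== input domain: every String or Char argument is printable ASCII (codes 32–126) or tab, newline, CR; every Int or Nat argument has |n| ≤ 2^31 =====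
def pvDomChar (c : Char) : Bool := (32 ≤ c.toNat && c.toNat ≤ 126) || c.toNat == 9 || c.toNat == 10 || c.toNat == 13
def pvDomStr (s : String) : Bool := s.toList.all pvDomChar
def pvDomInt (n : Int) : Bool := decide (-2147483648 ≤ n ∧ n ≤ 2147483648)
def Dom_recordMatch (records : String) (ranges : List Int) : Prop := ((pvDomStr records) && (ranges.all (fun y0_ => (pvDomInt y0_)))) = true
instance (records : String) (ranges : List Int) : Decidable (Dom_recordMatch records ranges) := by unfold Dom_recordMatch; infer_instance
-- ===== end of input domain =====

-- B extracts the maximal '#'-run lengths first and then compares them positionally to ranges: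
-- a two-phase decomposition instead of A's single stateful loop with a sentinel '.' append.
-- Pre_ excludes exactly the inputs where Python A raises IndexError (and Python B raises it too).

-- ===== PORT A =====
-- loop over records+'.' with state (i, count); early return False on mismatch.
-- ranges[i] is PySem.List.pyGet?; the `none` (IndexError) case — excluded by Pre_ — yields false.
def recordMatchLoop (cs : List Char) (ranges : List Int) (i : Nat) (count : Nat) : Bool :=
  match cs with
  | [] => true
  | c :: rest =>
    if c = '#' then recordMatchLoop rest ranges i (count + 1)
    else if count > 0 then
      match PySem.List.pyGet? ranges (i : Int) with
      | none => false
      | some v => if v ≠ (count : Int) then false else recordMatchLoop rest ranges (i + 1) 0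
    else recordMatchLoop rest ranges i count

def recordMatch (records : String) (ranges : List Int) : Bool :=
  recordMatchLoop (records.toList ++ ['.']) ranges 0 0

-- ===== PORT B =====
-- phase 1: lengths of the maximal '#' runs (inner while = takeWhile/dropWhile)
def runsOf : List Char → List Nat
  | [] => []
  | c :: rest =>
    if c = '#' then
      ((rest.takeWhile (· = '#')).length + 1) :: runsOf (rest.dropWhile (· = '#'))
    else runsOf rest
termination_by cs => cs.length
decreasing_by
  · simpa using Nat.lt_succ_of_le (List.length_dropWhile_le _ _)
  · simp

-- phase 2: positional comparison (ranges[j] is pyGet?; none = IndexError, excluded by Pre_)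
def checkRuns (runs : List Nat) (j : Nat) (ranges : List Int) : Bool :=
  match runs with
  | [] => true
  | L :: rest =>
    match PySem.List.pyGet? ranges (j : Int) with
    | none => false
    | some v => if v ≠ (L : Int) then false else checkRuns rest (j + 1) ranges

def recordMatch_alt (records : String) (ranges : List Int) : Bool :=
  checkRuns (runsOf records.toList) 0 ranges

-- ===== PRECONDITION & SPEC =====
-- the maximal '#' segments of the string, characterised via the library splitter (no loop of either port)
def preSegs (records : String) : List (List Char) :=
  (records.toList.splitOnP (fun c => ¬ c = '#')).filter (fun seg => seg ≠ [])

-- Pre_ excludes exactly the inputs on which Python A raises IndexError: the string has more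
-- maximal '#' segments than ranges has entries while every entry of ranges equals its segment's length.
def Pre_recordMatch (records : String) (ranges : List Int) : Prop :=
  ¬ (ranges.length < (preSegs records).length ∧
     ranges = ((preSegs records).take ranges.length).map (fun seg => (seg.length : Int)))

instance (records : String) (ranges : List Int) : Decidable (Pre_recordMatch records ranges) := by
  unfold Pre_recordMatch; infer_instance

def pvWitness_recordMatch : String × List Int := ("##.#", [2, 1])

def Spec_recordMatch (records : String) (ranges : List Int) (out : Bool) : Prop := out = recordMatch_alt records ranges
instance (records : String) (ranges : List Int) (out : Bool) : Decidable (Spec_recordMatch records ranges out) := by unfold Spec_recordMatch; infer_instance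

-- ===== CLAIM (what is proved, stated in full; the proofs are below) =====
def Claim_equal_recordMatch : Prop := ∀ (records : String) (ranges : List Int), Dom_recordMatch records ranges → Pre_recordMatch records ranges → Spec_recordMatch records ranges (recordMatch records ranges)

-- ===== LEMMAS AND PROOFS =====

-- run lengths of cs with an open run of length `count` already pending, dropping a trailing open run
def pend (count : Nat) : List Char → List Nat
  | [] => []
  | c :: rest =>
    if c = '#' then pend (count + 1) rest
    else if count > 0 then count :: pend 0 rest else pend 0 rest

lemma recordMatchLoop_eq_checkRuns (cs : List Char) (ranges : List Int) (i count : Nat) :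
    recordMatchLoop cs ranges i count = checkRuns (pend count cs) i ranges := by
  induction cs generalizing i count with
  | nil => simp [recordMatchLoop, pend, checkRuns]
  | cons c rest ih =>
    by_cases hc : c = '#'
    · simp [recordMatchLoop, pend, hc, ih]
    · by_cases hcnt : count > 0
      · simp only [recordMatchLoop, if_neg hc, if_pos hcnt]
        have hp : pend count (c :: rest) = count :: pend 0 rest := by
          simp [pend, hc, hcnt]
        rw [hp]
        simp only [checkRuns]
        cases PySem.List.pyGet? ranges (i : Int) with
        | none => rfl
        | some v =>
          by_cases hv : v = (count : Int)
          · simp [hv, ih]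
          · simp [hv]
      · have hz : count = 0 := by omega
        subst hz
        simp [recordMatchLoop, pend, hc, ih]

lemma pend_pos (cs : List Char) (count : Nat) (hc : 0 < count) :
    pend count (cs ++ ['.']) =
      (count + (cs.takeWhile (· = '#')).length) :: pend 0 ((cs.dropWhile (· = '#')) ++ ['.']) := by
  induction cs generalizing count with
  | nil => simp [pend, hc]
  | cons c rest ih =>
    by_cases h : c = '#'
    · simp only [List.cons_append, pend, h, List.takeWhile_cons, List.dropWhile_cons,
        decide_true]
      rw [ih (count + 1) (by omega)]
      simp
      omega
    · simp [pend, h, hc]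

lemma pend_zero_append_dot (cs : List Char) : pend 0 (cs ++ ['.']) = runsOf cs := by
  induction cs using runsOf.induct with
  | case1 => simp [pend, runsOf]
  | case2 rest ih =>
    show pend 0 ('#' :: rest ++ ['.']) = runsOf ('#' :: rest)
    rw [List.cons_append]
    simp only [pend, runsOf]
    rw [pend_pos rest 1 (by omega), ih]
    simp
    omega
  | case3 c rest h ih =>
    show pend 0 (c :: rest ++ ['.']) = runsOf (c :: rest)
    rw [List.cons_append]
    simp [pend, runsOf, h, ih]

-- ===== VERDICT (by name: the statement is the Claim_ definition above) =====
theorem recordMatch_spec : Claim_equal_recordMatch := by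
  intro records ranges _ _
  unfold Spec_recordMatch recordMatch recordMatch_alt
  rw [recordMatchLoop_eq_checkRuns, pend_zero_append_dot]
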